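-- pv_equiv track=rewrite | github.com/cgdilley/AdventOfCode2019 | [Day08.2]SpaceImageFormat.py | merge_layers
-- ===== SOURCE A (Python) =====
-- from typing import List
--
-- def merge_layers(image: List[List[List[int]]], width: int, height: int, layers: int) -> List[List[int]]:
--     merged = [[2 for c in range(width)] for r in range(height)]
--     for row in range(height):
--         for col in range(width):
--             for layer in range(layers):
--                 if image[layer][row][col] != 2:
--                     merged[row][col] = image[layer][row][col]
--                     break
--     return merged
-- ===== SOURCE B (Python) =====
-- from typing import List
--
-- def merge_layers(image: List[List[List[int]]], width: int, height: int, layers: int) -> List[List[int]]: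
--     # Painter's algorithm: composite layers back-to-front, front layers painted last win.
--     merged = [[2 for c in range(width)] for r in range(height)]
--     if height <= 0 or width <= 0:
--         return merged
--     for layer in range(layers - 1, -1, -1):
--         for row in range(height):
--             for col in range(width):
--                 pixel = image[layer][row][col]
--                 if pixel != 2:
--                     merged[row][col] = pixel
--     return merged
-- ===== Notes on version B (the rewrite author's own statement) =====
-- stated objective: alternative
-- what changed: Inverted loop nesting: instead of scanning layers front-to-back per pixel with a break at the first non-transparent value, B composites whole layers back-to-front (painter's algorithm), unconditionally overwriting merged pixels so the front-most non-transparent value wins.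
-- outside the precondition, e.g. on merge_layers([[[1]], [[]]], 1, 1, 2): A returns [[1]], B raises IndexError
import Mathlib
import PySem

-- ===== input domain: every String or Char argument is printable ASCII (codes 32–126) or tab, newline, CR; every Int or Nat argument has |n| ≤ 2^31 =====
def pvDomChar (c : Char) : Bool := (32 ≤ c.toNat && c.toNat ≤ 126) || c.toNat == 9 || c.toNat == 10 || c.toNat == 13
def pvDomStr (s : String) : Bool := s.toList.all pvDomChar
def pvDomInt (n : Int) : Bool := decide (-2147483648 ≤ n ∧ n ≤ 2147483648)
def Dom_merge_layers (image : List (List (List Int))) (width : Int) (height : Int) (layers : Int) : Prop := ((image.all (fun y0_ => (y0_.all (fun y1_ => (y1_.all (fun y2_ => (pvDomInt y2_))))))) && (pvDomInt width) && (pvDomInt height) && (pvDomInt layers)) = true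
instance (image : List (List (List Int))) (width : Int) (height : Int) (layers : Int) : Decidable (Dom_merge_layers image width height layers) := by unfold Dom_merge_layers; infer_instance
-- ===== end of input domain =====

-- B composites layers back-to-front (painter's algorithm) instead of per-pixel front-to-back scan with break; same result, same cost.


-- shared indexing helper: image[layer][row][col] (in range on every read under Pre_)
def pvGet3 (image : List (List (List Int))) (l r c : Int) : Int :=
  PySem.List.pyGetD (PySem.List.pyGetD (PySem.List.pyGetD image l []) r []) c 0

-- in-place assignment merged[r][c] = v, by structural index
def pvSet2 (m : List (List Int)) (r c v : Int) : List (List Int) :=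
  m.zipIdx.map (fun p => if (p.2 : Int) = r then p.1.zipIdx.map (fun q => if (q.2 : Int) = c then v else q.1) else p.1)

-- ===== PORT A =====
-- the inner 'for layer in range(layers): … break' — returns the first non-2 pixel, none if all transparent
def pvScanA (image : List (List (List Int))) (r c : Int) : List Int → Option Int
  | [] => none
  | l :: rest =>
    if pvGet3 image l r c ≠ 2 then some (pvGet3 image l r c)
    else pvScanA image r c rest

def merge_layers (image : List (List (List Int))) (width : Int) (height : Int) (layers : Int) : List (List Int) :=
  let merged := (PySem.List.pyRange 0 height 1).map (fun _ => (PySem.List.pyRange 0 width 1).map (fun _ => (2 : Int)))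
  (PySem.List.pyRange 0 height 1).foldl (fun m row =>
    (PySem.List.pyRange 0 width 1).foldl (fun m col =>
      match pvScanA image row col (PySem.List.pyRange 0 layers 1) with
      | some v => pvSet2 m row col v
      | none => m) m) merged

-- ===== PORT B =====
def merge_layers_alt (image : List (List (List Int))) (width : Int) (height : Int) (layers : Int) : List (List Int) :=
  let merged := (PySem.List.pyRange 0 height 1).map (fun _ => (PySem.List.pyRange 0 width 1).map (fun _ => (2 : Int)))
  if height ≤ 0 ∨ width ≤ 0 then merged else
  (PySem.List.pyRange (layers - 1) (-1) (-1)).foldl (fun m layer =>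
    (PySem.List.pyRange 0 height 1).foldl (fun m row =>
      (PySem.List.pyRange 0 width 1).foldl (fun m col =>
        let pixel := pvGet3 image layer row col
        if pixel ≠ 2 then pvSet2 m row col pixel else m) m) m) merged

-- ===== PRECONDITION & SPEC =====
-- Pre_ excludes ragged images (fewer than `layers` layers, or short rows/columns) on which
-- A's early break may dodge an out-of-range read while B, scanning every layer, raises IndexError.
def Pre_merge_layers (image : List (List (List Int))) (width : Int) (height : Int) (layers : Int) : Prop :=
  (0 < width ∧ 0 < height ∧ 0 < layers) →
    (layers ≤ (image.length : Int) ∧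
      ∀ lyr ∈ image.take layers.toNat,
        height ≤ (lyr.length : Int) ∧ ∀ row ∈ lyr.take height.toNat, width ≤ (row.length : Int))
instance (image : List (List (List Int))) (width : Int) (height : Int) (layers : Int) : Decidable (Pre_merge_layers image width height layers) := by unfold Pre_merge_layers; infer_instance

def pvWitness_merge_layers : List (List (List Int)) × Int × Int × Int :=
  ([[[2, 1], [0, 2]], [[1, 1], [1, 1]]], 2, 2, 2)

def Spec_merge_layers (image : List (List (List Int))) (width : Int) (height : Int) (layers : Int) (out : List (List Int)) : Prop := out = merge_layers_alt image width height layers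
instance (image : List (List (List Int))) (width : Int) (height : Int) (layers : Int) (out : List (List Int)) : Decidable (Spec_merge_layers image width height layers out) := by unfold Spec_merge_layers; infer_instance

-- ===== CLAIM (what is proved, stated in full; the proofs are below) =====
def Claim_equal_merge_layers : Prop := ∀ (image : List (List (List Int))) (width : Int) (height : Int) (layers : Int), Dom_merge_layers image width height layers → Pre_merge_layers image width height layers → Spec_merge_layers image width height layers (merge_layers image width height layers)

-- ===== LEMMAS AND PROOFS =====

-- a height×width grid of f r c, rows/cols indexed by the actual pyRange values
def pvGrid (h w : Int) (f : Int → Int → Int) : List (List Int) :=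
  (PySem.List.pyRange 0 h 1).map (fun r => (PySem.List.pyRange 0 w 1).map (fun c => f r c))

-- A's per-cell result with default d
def pvCellD (image : List (List (List Int))) (r c : Int) (L : List Int) (d : Int) : Int :=
  match pvScanA image r c L with
  | some v => v
  | none => d

theorem pvCellD_idem (image : List (List (List Int))) (r c : Int) (L : List Int) (d : Int) :
    pvCellD image r c L (pvCellD image r c L d) = pvCellD image r c L d := by
  unfold pvCellD; cases pvScanA image r c L <;> simp

theorem pvRev (layers : Int) :
    PySem.List.pyRange (layers - 1) (-1) (-1) = (PySem.List.pyRange 0 layers 1).reverse := by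
  have := PySem.List.pyRange_neg_one_eq_reverse (layers - 1) (-1)
  simpa using this

theorem pvSet2_grid (h w r c v : Int) (f : Int → Int → Int) :
    pvSet2 (pvGrid h w f) r c v
      = pvGrid h w (fun r' c' => if r' = r ∧ c' = c then v else f r' c') := by
  apply List.ext_getElem
  · simp [pvSet2, pvGrid]
  · intro i h1 h2
    simp only [pvSet2, pvGrid, List.getElem_map, List.getElem_zipIdx,
      PySem.List.getElem_pyRange_one, zero_add]
    by_cases hr : (i : Int) = r
    · simp only [hr]
      apply List.ext_getElem
      · simp
      · intro j j1 j2
        simp only [List.getElem_map, PySem.List.getElem_pyRange_one, zero_add]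
        by_cases hc : (j : Int) = c
        · simp [hc]
        · simp [hc]
    · simp only [hr]
      apply List.map_congr_left
      intro x hx
      have hn : ¬ ((i:Int) = r ∧ x = c) := fun hp => hr hp.1
      simp [hn, hr]

-- A: inner col loop over a grid
theorem pvA_col (image : List (List (List Int))) (h w r : Int) (L : List Int) :
    ∀ (cs : List Int) (f : Int → Int → Int),
      cs.foldl (fun m col =>
        match pvScanA image r col L with
        | some v => pvSet2 m r col v
        | none => m) (pvGrid h w f)
      = pvGrid h w (fun r' c' => if r' = r ∧ c' ∈ cs then pvCellD image r' c' L (f r' c') else f r' c') := by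
  intro cs
  induction cs with
  | nil => intro f; simp [pvGrid]
  | cons c0 rest ih =>
    intro f
    simp only [List.foldl_cons]
    have hstep : (match pvScanA image r c0 L with
        | some v => pvSet2 (pvGrid h w f) r c0 v
        | none => pvGrid h w f)
        = pvGrid h w (fun r' c' => if r' = r ∧ c' = c0 then pvCellD image r' c' L (f r' c') else f r' c') := by
      cases hs : pvScanA image r c0 L with
      | none =>
        show pvGrid h w f = _
        apply congrArg; funext r' c'
        by_cases hc : r' = r ∧ c' = c0
        · obtain ⟨h1, h2⟩ := hc; subst h1; subst h2; simp [pvCellD, hs]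
        · simp [hc]
      | some v =>
        show pvSet2 (pvGrid h w f) r c0 v = _
        rw [pvSet2_grid]
        apply congrArg; funext r' c'
        by_cases hc : r' = r ∧ c' = c0
        · obtain ⟨h1, h2⟩ := hc; subst h1; subst h2; simp [pvCellD, hs]
        · simp [hc]
    rw [hstep, ih]
    apply congrArg; funext r' c'
    by_cases hr : r' = r
    · subst hr
      by_cases hc0 : c' = c0
      · subst hc0
        by_cases hm : c' ∈ rest <;> simp [hm, pvCellD_idem]
      · by_cases hm : c' ∈ rest <;> simp [hm, hc0]
    · simp [hr]

-- A: row loop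
theorem pvA_row (image : List (List (List Int))) (h w : Int) (L : List Int) :
    ∀ (rs : List Int) (f : Int → Int → Int),
      rs.foldl (fun m row =>
        (PySem.List.pyRange 0 w 1).foldl (fun m col =>
          match pvScanA image row col L with
          | some v => pvSet2 m row col v
          | none => m) m) (pvGrid h w f)
      = pvGrid h w (fun r' c' => if r' ∈ rs ∧ c' ∈ PySem.List.pyRange 0 w 1 then pvCellD image r' c' L (f r' c') else f r' c') := by
  intro rs
  induction rs with
  | nil => intro f; simp [pvGrid]
  | cons r0 rest ih =>
    intro f
    simp only [List.foldl_cons]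
    rw [pvA_col image h w r0 L, ih]
    apply congrArg; funext r' c'
    by_cases hc : c' ∈ PySem.List.pyRange 0 w 1
    · by_cases hr0 : r' = r0
      · subst hr0
        by_cases hm : r' ∈ rest <;> simp [hm, hc, pvCellD_idem]
      · by_cases hm : r' ∈ rest <;> simp [hm, hc, hr0]
    · simp [hc]

-- B: inner col loop
theorem pvB_col (image : List (List (List Int))) (h w l r : Int) :
    ∀ (cs : List Int) (f : Int → Int → Int),
      cs.foldl (fun m col =>
        let pixel := pvGet3 image l r col
        if pixel ≠ 2 then pvSet2 m r col pixel else m) (pvGrid h w f)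
      = pvGrid h w (fun r' c' => if r' = r ∧ c' ∈ cs ∧ pvGet3 image l r' c' ≠ 2 then pvGet3 image l r' c' else f r' c') := by
  intro cs
  induction cs with
  | nil => intro f; simp [pvGrid]
  | cons c0 rest ih =>
    intro f
    simp only [List.foldl_cons]
    have hstep : (if pvGet3 image l r c0 ≠ 2 then pvSet2 (pvGrid h w f) r c0 (pvGet3 image l r c0) else pvGrid h w f)
        = pvGrid h w (fun r' c' => if r' = r ∧ c' = c0 ∧ pvGet3 image l r' c' ≠ 2 then pvGet3 image l r' c' else f r' c') := by
      by_cases hp : pvGet3 image l r c0 ≠ 2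
      · rw [if_pos hp, pvSet2_grid]
        apply congrArg; funext r' c'
        by_cases hc : r' = r ∧ c' = c0
        · obtain ⟨h1, h2⟩ := hc; subst h1; subst h2; simp [hp]
        · rcases Decidable.not_and_iff_not_or_not.mp hc with h | h <;> simp [h]
      · rw [if_neg hp]
        apply congrArg; funext r' c'
        by_cases hc : r' = r ∧ c' = c0
        · obtain ⟨h1, h2⟩ := hc; subst h1; subst h2; simp [hp]
        · rcases Decidable.not_and_iff_not_or_not.mp hc with h | h <;> simp [h]
    rw [hstep, ih]
    apply congrArg; funext r' c'
    by_cases hr : r' = r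
    · subst hr
      by_cases hp : pvGet3 image l r' c' ≠ 2
      · by_cases hc0 : c' = c0
        · subst hc0
          by_cases hm : c' ∈ rest <;> simp [hm, hp]
        · by_cases hm : c' ∈ rest <;> simp [hm, hc0, hp]
      · simp [hp]
    · simp [hr]

-- B: row loop for one layer
theorem pvB_row (image : List (List (List Int))) (h w l : Int) :
    ∀ (rs : List Int) (f : Int → Int → Int),
      rs.foldl (fun m row =>
        (PySem.List.pyRange 0 w 1).foldl (fun m col =>
          let pixel := pvGet3 image l row col
          if pixel ≠ 2 then pvSet2 m row col pixel else m) m) (pvGrid h w f)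
      = pvGrid h w (fun r' c' => if r' ∈ rs ∧ c' ∈ PySem.List.pyRange 0 w 1 ∧ pvGet3 image l r' c' ≠ 2 then pvGet3 image l r' c' else f r' c') := by
  intro rs
  induction rs with
  | nil => intro f; simp [pvGrid]
  | cons r0 rest ih =>
    intro f
    simp only [List.foldl_cons]
    rw [pvB_col image h w l r0, ih]
    apply congrArg; funext r' c'
    by_cases hc : c' ∈ PySem.List.pyRange 0 w 1
    · by_cases hp : pvGet3 image l r' c' ≠ 2
      · by_cases hr0 : r' = r0
        · subst hr0
          by_cases hm : r' ∈ rest <;> simp [hm, hc, hp]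
        · by_cases hm : r' ∈ rest <;> simp [hm, hc, hr0, hp]
      · simp [hp, hc]
    · simp [hc]

-- B: layer loop
theorem pvB_layer (image : List (List (List Int))) (h w : Int) :
    ∀ (ls : List Int) (f : Int → Int → Int),
      ls.foldl (fun m layer =>
        (PySem.List.pyRange 0 h 1).foldl (fun m row =>
          (PySem.List.pyRange 0 w 1).foldl (fun m col =>
            let pixel := pvGet3 image layer row col
            if pixel ≠ 2 then pvSet2 m row col pixel else m) m) m) (pvGrid h w f)
      = pvGrid h w (fun r c => if r ∈ PySem.List.pyRange 0 h 1 ∧ c ∈ PySem.List.pyRange 0 w 1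
          then ls.foldl (fun acc l => if pvGet3 image l r c ≠ 2 then pvGet3 image l r c else acc) (f r c)
          else f r c) := by
  intro ls
  induction ls with
  | nil => intro f; simp [pvGrid]
  | cons l0 rest ih =>
    intro f
    simp only [List.foldl_cons]
    rw [pvB_row image h w l0, ih]
    apply congrArg; funext r c
    by_cases hm : r ∈ PySem.List.pyRange 0 h 1 ∧ c ∈ PySem.List.pyRange 0 w 1
    · obtain ⟨h1, h2⟩ := hm
      by_cases hp : pvGet3 image l0 r c ≠ 2 <;> simp [h1, h2, hp]
    · rcases Decidable.not_and_iff_not_or_not.mp hm with h | h <;> simp [h]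

-- per-cell: back-to-front overwrite = first hit
theorem pvCell_eq (image : List (List (List Int))) (r c : Int) :
    ∀ (L : List Int) (d : Int),
      L.reverse.foldl (fun acc l => if pvGet3 image l r c ≠ 2 then pvGet3 image l r c else acc) d
      = pvCellD image r c L d := by
  intro L
  induction L with
  | nil => intro d; simp [pvCellD, pvScanA]
  | cons l0 rest ih =>
    intro d
    rw [List.reverse_cons, List.foldl_append]
    simp only [List.foldl_cons, List.foldl_nil, ih]
    by_cases hp : pvGet3 image l0 r c ≠ 2 <;> simp [pvCellD, pvScanA, hp]

-- ===== VERDICT (by name: the statement is the Claim_ definition above) =====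
theorem merge_layers_spec : Claim_equal_merge_layers := by
  intro image width height layers _ _
  unfold Spec_merge_layers merge_layers merge_layers_alt
  have hinit : (PySem.List.pyRange 0 height 1).map (fun _ => (PySem.List.pyRange 0 width 1).map (fun _ => (2 : Int)))
      = pvGrid height width (fun _ _ => (2 : Int)) := rfl
  by_cases hcase : height ≤ 0 ∨ width ≤ 0
  · rw [hinit, if_pos hcase, pvA_row image height width (PySem.List.pyRange 0 layers 1)]
    apply congrArg; funext r c
    rcases hcase with hh | hw
    · have hr : r ∉ PySem.List.pyRange 0 height 1 := by
        rw [PySem.List.mem_pyRange_one]; omega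
      simp [hr]
    · have hc : c ∉ PySem.List.pyRange 0 width 1 := by
        rw [PySem.List.mem_pyRange_one]; omega
      simp [hc]
  · rw [hinit, if_neg hcase, pvA_row image height width (PySem.List.pyRange 0 layers 1),
      pvRev layers, pvB_layer image height width]
    apply congrArg; funext r c
    by_cases hm : r ∈ PySem.List.pyRange 0 height 1 ∧ c ∈ PySem.List.pyRange 0 width 1
    · obtain ⟨h1, h2⟩ := hm
      simp only [h1, h2, and_self, if_pos]
      rw [pvCell_eq image r c (PySem.List.pyRange 0 layers 1) 2]
    · rcases Decidable.not_and_iff_not_or_not.mp hm with h | h <;> simp [h]
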